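-- pv_equiv track=rewrite | github.com/JiexingQi/codalab_spider | text-to-sql/seq2seq/preprocess/transform_utils.py | find_sep_mullen
-- ===== SOURCE A (Python) =====
-- def isValid(idx, maxlen):
--     if idx >=0 and idx<maxlen:
--         return True
--     return False
--
-- def find_sep_mullen(item_list, sep_item):
--     start = 0
--     times = 2
--     sep_list = []
--     while start < len(item_list):
--         try:
--             index = item_list.index(sep_item, start)
--             start = index+1
--             if isValid(start, len(item_list)):
--                 if (item_list[start] == sep_item):
--                     sep_list.append(index)
--         except:
--             break
--     sep_list.append(len(item_list))
--     return sep_list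
-- ===== SOURCE B (Python) =====
-- def find_sep_mullen(item_list, sep_item):
--     n = len(item_list)
--     res = [i for i in range(n - 1)
--            if item_list[i] == sep_item and item_list[i + 1] == sep_item]
--     res.append(n)
--     return res
-- ===== Notes on version B (the rewrite author's own statement) =====
-- stated objective: simpler
-- what changed: Replaced the start-pointer/.index/try-except while-loop with a single comprehension over adjacent index pairs (i, i+1), appending len at the end.
import Mathlib
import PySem

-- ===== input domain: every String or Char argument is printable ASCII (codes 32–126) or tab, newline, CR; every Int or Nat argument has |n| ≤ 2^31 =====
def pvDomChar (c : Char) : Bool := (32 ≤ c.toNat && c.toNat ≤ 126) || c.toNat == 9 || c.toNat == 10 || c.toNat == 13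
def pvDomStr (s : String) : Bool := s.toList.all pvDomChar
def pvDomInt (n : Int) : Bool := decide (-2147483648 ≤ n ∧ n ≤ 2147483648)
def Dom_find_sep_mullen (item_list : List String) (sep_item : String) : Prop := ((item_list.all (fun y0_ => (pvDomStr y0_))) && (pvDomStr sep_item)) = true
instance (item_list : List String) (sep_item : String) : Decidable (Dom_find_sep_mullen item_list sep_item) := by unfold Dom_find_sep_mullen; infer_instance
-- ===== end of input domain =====

-- B replaces A's start-pointer/.index/try-except loop with one pass over adjacent index pairs (simpler decomposition).


-- ===== PORT A =====
-- Python: isValid(idx, maxlen)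
def pvIsValid (idx : Nat) (maxlen : Nat) : Bool :=
  if idx < maxlen then true else false   -- idx ≥ 0 always holds for the Nat start pointer

-- the while loop: 'item_list.index(sep_item, start)' is ported by hand as first index
-- of sep_item in 'item_list.drop start' shifted by start (exact: Python searches from 'start').
def pvFindLoop (item_list : List String) (sep_item : String) (start : Nat) (sep_list : List Int) : List Int :=
  if _h : start < item_list.length then
    match PySem.List.index? (item_list.drop start) sep_item with
    | none => sep_list   -- ValueError: break
    | some j =>
      let index := start + j
      let start' := index + 1
      pvFindLoop item_list sep_item start'
        (if pvIsValid start' item_list.length then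
           (if item_list.getD start' "" == sep_item then sep_list ++ [(index : Int)] else sep_list)
         else sep_list)
  else sep_list
termination_by item_list.length - start
decreasing_by omega

def find_sep_mullen (item_list : List String) (sep_item : String) : List Int :=
  pvFindLoop item_list sep_item 0 [] ++ [(item_list.length : Int)]

-- ===== PORT B =====
def find_sep_mullen_alt (item_list : List String) (sep_item : String) : List Int :=
  (((List.range (item_list.length - 1)).filter
      (fun i => item_list.getD i "" == sep_item && item_list.getD (i + 1) "" == sep_item)).map
    (fun i => (i : Int))) ++ [(item_list.length : Int)]

-- ===== PRECONDITION & SPEC =====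
def Spec_find_sep_mullen (item_list : List String) (sep_item : String) (out : List Int) : Prop := out = find_sep_mullen_alt item_list sep_item
instance (item_list : List String) (sep_item : String) (out : List Int) : Decidable (Spec_find_sep_mullen item_list sep_item out) := by unfold Spec_find_sep_mullen; infer_instance

-- ===== CLAIM (what is proved, stated in full; the proofs are below) =====
def Claim_equal_find_sep_mullen : Prop := ∀ (item_list : List String) (sep_item : String), Dom_find_sep_mullen item_list sep_item → Spec_find_sep_mullen item_list sep_item (find_sep_mullen item_list sep_item)

-- ===== LEMMAS AND PROOFS =====


-- loop invariant: from position 'start', A's loop appends exactly the adjacent-pair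
-- indices i ∈ [start, n-1) with xs[i] = xs[i+1] = sep, in increasing order.
lemma pvFindLoop_eq (xs : List String) (sep : String) :
    ∀ fuel start acc, xs.length - start ≤ fuel →
      pvFindLoop xs sep start acc =
        acc ++ ((List.range' start (xs.length - 1 - start)).filter
          (fun i => xs.getD i "" == sep && xs.getD (i + 1) "" == sep)).map (fun i => (i : Int)) := by
  intro fuel
  induction fuel with
  | zero =>
    intro start acc h
    have hs : ¬ start < xs.length := by omega
    rw [pvFindLoop, dif_neg hs]
    have e : xs.length - 1 - start = 0 := by omega
    simp [e]
  | succ k ih =>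
    intro start acc h
    by_cases hs : start < xs.length
    · rw [pvFindLoop, dif_pos hs]
      rcases hidx : PySem.List.index? (xs.drop start) sep with _ | j
      · -- no further occurrence of sep: loop breaks, and no pair index ≥ start exists
        have hmem : sep ∉ xs.drop start := (PySem.List.index?_eq_none_iff _ _).mp hidx
        have hfil : (List.range' start (xs.length - 1 - start)).filter
            (fun i => xs.getD i "" == sep && xs.getD (i + 1) "" == sep) = [] := by
          rw [List.filter_eq_nil_iff]
          intro i hi
          obtain ⟨hi1, hi2⟩ := List.mem_range'_1.mp hi
          have hilt : i < xs.length := by omega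
          have hne : xs[i] ≠ sep := by
            intro hEq
            apply hmem
            have hdl : i - start < (xs.drop start).length := by simp; omega
            have : (xs.drop start)[i - start] = xs[i] := by
              rw [List.getElem_drop]
              congr 1
              omega
            rw [← hEq, ← this]
            exact List.getElem_mem hdl
          simp [List.getD, List.getElem?_eq_getElem hilt, hne]
        rw [hfil]
        simp
      · -- next occurrence at index start + j
        obtain ⟨hk, hget, hprev⟩ := PySem.List.getElem_of_index?_eq_some hidx
        have hlen : start + j < xs.length := by
          have := hk
          simp at this
          omega
        have hxsj : xs[start + j]'hlen = sep := by
          rw [← hget, List.getElem_drop]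
        -- split off the sep-free prefix [start, start+j)
        have e1 : xs.length - 1 - start = j + (xs.length - 1 - (start + j)) := by omega
        have hfil1 : (List.range' start j).filter
            (fun i => xs.getD i "" == sep && xs.getD (i + 1) "" == sep) = [] := by
          rw [List.filter_eq_nil_iff]
          intro i hi
          obtain ⟨hi1, hi2⟩ := List.mem_range'_1.mp hi
          have hilt : i < xs.length := by omega
          have hne : xs[i] ≠ sep := by
            intro hEq
            have hdl : i - start < j := by omega
            apply hprev (i - start) hdl
            rw [List.getElem_drop]
            have : start + (i - start) = i := by omega
            simp [this, hEq]
          simp [List.getD, List.getElem?_eq_getElem hilt, hne]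
        dsimp only
        rw [e1, ← List.range'_append_1, List.filter_append, hfil1, List.nil_append]
        by_cases h2 : start + j + 1 < xs.length
        · -- the pair slot start+j is inside the list
          have e2 : xs.length - 1 - (start + j) = (xs.length - 1 - (start + j + 1)) + 1 := by omega
          rw [e2, List.range'_succ, List.filter_cons]
          have hvalid : pvIsValid (start + j + 1) xs.length = true := by
            simp [pvIsValid, h2]
          rw [hvalid]
          by_cases hb : xs[start + j + 1]'h2 = sep
          · have hcond : (xs.getD (start + j + 1) "" == sep) = true := by
              rw [List.getD_eq_getElem xs "" h2, hb]
              simp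
            rw [if_pos hcond, ih (start + j + 1) _ (by omega)]
            simp [List.getElem?_eq_getElem hlen, List.getElem?_eq_getElem h2, hxsj, hb]
          · have hcond : ¬ ((xs.getD (start + j + 1) "" == sep) = true) := by
              rw [List.getD_eq_getElem xs "" h2]
              simp [hb]
            rw [if_neg hcond, ih (start + j + 1) _ (by omega)]
            simp [List.getElem?_eq_getElem hlen, List.getElem?_eq_getElem h2, hxsj, hb]
        · -- start+j is the last element: no pair, loop terminates next round
          have e2 : xs.length - 1 - (start + j) = 0 := by omega
          have hvalid : pvIsValid (start + j + 1) xs.length = false := by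
            simp [pvIsValid]
            omega
          rw [hvalid, if_neg (by simp), ih (start + j + 1) _ (by omega)]
          have e3 : xs.length - 1 - (start + j + 1) = 0 := by omega
          simp [e2, e3]
    · rw [pvFindLoop, dif_neg hs]
      have e : xs.length - 1 - start = 0 := by omega
      simp [e]

theorem find_sep_mullen_spec : Claim_equal_find_sep_mullen := by
  intro xs sep _
  unfold Spec_find_sep_mullen find_sep_mullen find_sep_mullen_alt
  rw [pvFindLoop_eq xs sep (xs.length) 0 [] (by omega)]
  simp [List.range_eq_range']
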